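-- pv_equiv track=rewrite | github.com/aberdichevskaia/catalytic-sites-annotation | downstream_tasks/isoforms_analysis/rank_interesting_isoforms.py | choose_reference_isoform
-- ===== SOURCE A (Python) =====
-- from typing import Dict, List, Tuple, Optional
--
-- def choose_reference_isoform(iso_ids: List[str]) -> str:
--     iso_ids = sorted(set(iso_ids))
--     for x in iso_ids:
--         if x.endswith("-1"):
--             return x
--
--     def iso_num(x: str) -> Tuple[int, str]:
--         if "-" in x:
--             suf = x.split("-", 1)[1]
--             try:
--                 return (int(suf), x)
--             except Exception:
--                 pass
--         return (10**9, x)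
--
--     return sorted(iso_ids, key=iso_num)[0]
-- ===== SOURCE B (Python) =====
-- def _suffix_num(x):
--     if "-" in x:
--         suf = x.split("-", 1)[1]
--         try:
--             return int(suf)
--         except ValueError:
--             pass
--     return 10**9
--
-- def choose_reference_isoform(iso_ids):
--     best_ref = None      # lexicographically smallest id ending in "-1"
--     best_other = None    # (suffix number, id), smallest so far
--     for x in iso_ids:
--         if x.endswith("-1"):
--             if best_ref is None or x < best_ref:
--                 best_ref = x
--         else:
--             cand = (_suffix_num(x), x)
--             if best_other is None or cand < best_other:
--                 best_other = cand
--     if best_ref is not None: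
--         return best_ref
--     return best_other[1]
-- ===== Notes on version B (the rewrite author's own statement) =====
-- stated objective: alternative
-- what changed: A deduplicates into a set, sorts it, scans for a '-1' id, and if none re-sorts everything by a numeric-suffix key and indexes [0]; B makes a single pass over the raw list with two running accumulators (best '-1' id lexicographically, best other id by (suffix number, id)) and never builds a set or sorts.
import Mathlib
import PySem

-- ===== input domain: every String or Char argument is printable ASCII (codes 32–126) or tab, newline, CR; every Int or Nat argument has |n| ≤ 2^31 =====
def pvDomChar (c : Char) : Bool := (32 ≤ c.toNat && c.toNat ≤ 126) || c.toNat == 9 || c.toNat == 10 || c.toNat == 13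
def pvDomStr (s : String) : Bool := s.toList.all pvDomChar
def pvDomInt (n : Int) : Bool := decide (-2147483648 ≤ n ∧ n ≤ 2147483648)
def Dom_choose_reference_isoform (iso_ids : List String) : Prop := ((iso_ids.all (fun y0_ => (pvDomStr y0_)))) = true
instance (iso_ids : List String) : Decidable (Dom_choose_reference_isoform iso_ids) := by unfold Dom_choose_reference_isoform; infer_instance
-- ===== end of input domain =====

-- B replaces A's dedup + double sort by ONE pass over the raw list with two running
-- accumulators (best '-1' id, best other id by (suffix number, id)); return value only.

-- ===== PORT A =====
-- iso_num's Int component: int suffix after the first '-', 10^9 on no '-' or ValueError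
def pvIsoNumA (x : String) : Int :=
  if PySem.Str.isIn "-" x then
    -- x.split("-", 1)[1]: sep is the nonempty literal "-" so split succeeds, and the guard
    -- guarantees the list has two parts, so index 1 is in range
    match PySem.Int.ofStr? (((PySem.Str.splitMax? x "-" 1).getD []).getD 1 "") with
    | some n => n
    | none => 10 ^ 9
  else 10 ^ 9

def choose_reference_isoform (iso_ids : List String) : String :=
  let ids := PySem.List.sorted (PySem.Set.ofList iso_ids) (fun x => x)
  match ids.find? (fun y => PySem.Str.endswith y "-1") with
  | some x => x
  | none =>
    -- sorted(iso_ids, key=iso_num)[0]: [0] raises IndexError on empty input (outside Pre_)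
    (PySem.List.sorted2 ids pvIsoNumA (fun x => x)).headD ""

-- ===== PORT B =====
-- _suffix_num from Source B (same rule as A's iso_num helper)
def pvSuffixNum (x : String) : Int :=
  if PySem.Str.isIn "-" x then
    match PySem.Int.ofStr? (((PySem.Str.splitMax? x "-" 1).getD []).getD 1 "") with
    | some n => n
    | none => 10 ^ 9
  else 10 ^ 9

-- one iteration of B's for loop over the state (best_ref, best_other)
def pvStepB (acc : Option String × Option (Int × String)) (x : String) :
    Option String × Option (Int × String) :=
  if PySem.Str.endswith x "-1" then
    (match acc.1 with
     | none => some x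
     | some r => if x < r then some x else some r, acc.2)
  else
    -- cand < best_other is Python's lexicographic tuple comparison, written out
    let cand := (pvSuffixNum x, x)
    (acc.1,
     match acc.2 with
     | none => some cand
     | some b => if cand.1 < b.1 ∨ (cand.1 = b.1 ∧ cand.2 < b.2) then some cand else some b)

def choose_reference_isoform_alt (iso_ids : List String) : String :=
  let st := iso_ids.foldl pvStepB (none, none)
  match st.1 with
  | some r => r
  | none =>
    match st.2 with
    | some b => b.2
    | none => ""   -- Python B raises TypeError here (only on empty input, outside Pre_)

-- ===== PRECONDITION & SPEC =====
-- Pre_ excludes only the empty list, on which A raises IndexError (and B raises TypeError).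
def Pre_choose_reference_isoform (iso_ids : List String) : Prop := iso_ids ≠ []
instance (iso_ids : List String) : Decidable (Pre_choose_reference_isoform iso_ids) := by
  unfold Pre_choose_reference_isoform; infer_instance

def pvWitness_choose_reference_isoform : List String := ["P1-1", "P1-2"]

def Spec_choose_reference_isoform (iso_ids : List String) (out : String) : Prop :=
  out = choose_reference_isoform_alt iso_ids
instance (iso_ids : List String) (out : String) : Decidable (Spec_choose_reference_isoform iso_ids out) := by
  unfold Spec_choose_reference_isoform; infer_instance

-- ===== CLAIM (what is proved, stated in full; the proofs are below) =====
def Claim_equal_choose_reference_isoform : Prop :=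
  ∀ (iso_ids : List String), Dom_choose_reference_isoform iso_ids →
    Pre_choose_reference_isoform iso_ids →
    Spec_choose_reference_isoform iso_ids (choose_reference_isoform iso_ids)

-- ===== LEMMAS AND PROOFS =====

-- lexicographic key used to characterise both programs' numeric-suffix minimum
def pvLexKey (x : String) : Lex (Int × String) := toLex (pvSuffixNum x, x)

-- head of an insertBy-fold evolves exactly like a running-minimum fold
theorem pv_head?_foldl_insertBy {α : Type} (before : α → α → Bool) (xs : List α) (acc : List α) :
    (xs.foldl (fun a x => PySem.List.insertBy before x a) acc).head? =
      xs.foldl (fun o x =>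
        match o with
        | none => some x
        | some m => if before x m then some x else some m) acc.head? := by
  induction xs generalizing acc with
  | nil => rfl
  | cons x xs ih =>
    simp only [List.foldl_cons]
    rw [ih]
    congr 1
    cases acc with
    | nil => rfl
    | cons y ys =>
      simp only [PySem.List.insertBy, List.head?_cons]
      by_cases h : before x y = true
      · simp [h]
      · simp [h]

-- head of a stable key-sort is the first minimal element (the min2?/min? fold)
theorem pv_sorted2_head? {α : Type} (l : List α) (k1 : α → Int) (k2 : α → String) :
    (PySem.List.sorted2 l k1 k2).head? = PySem.List.min2? l k1 k2 := by
  simp only [PySem.List.sorted2, PySem.List.min2?]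
  exact pv_head?_foldl_insertBy _ l []

theorem pv_min2?_eq_min?_lex (l : List String) :
    PySem.List.min2? l pvSuffixNum (fun x => x) = PySem.List.min? l pvLexKey := by
  simp only [PySem.List.min2?, PySem.List.min?]
  congr 1
  funext o x
  cases o with
  | none => rfl
  | some m =>
    have hP : (pvLexKey x < pvLexKey m) ↔
        (pvSuffixNum x < pvSuffixNum m ∨
          (¬ pvSuffixNum m < pvSuffixNum x ∧ (x : String) < m)) := by
      simp only [pvLexKey]
      rw [Prod.Lex.lt_iff]
      constructor
      · rintro (h | ⟨he, h2⟩)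
        · exact Or.inl h
        · have he' : pvSuffixNum x = pvSuffixNum m := he
          exact Or.inr ⟨fun hc => absurd hc (he' ▸ lt_irrefl _), h2⟩
      · rintro (h | ⟨hn, h2⟩)
        · exact Or.inl h
        · rcases (not_lt.mp hn).lt_or_eq with hlt | heq
          · exact Or.inl hlt
          · exact Or.inr ⟨heq, h2⟩
    have hcond : ((decide (pvSuffixNum x < pvSuffixNum m) ||
        !decide (pvSuffixNum m < pvSuffixNum x) && decide ((x : String) < m)) = true) ↔
        (pvLexKey x < pvLexKey m) := by
      rw [hP]
      simp only [Bool.or_eq_true, Bool.and_eq_true, Bool.not_eq_true', decide_eq_true_eq,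
        decide_eq_false_iff_not]
    simp only []
    exact if_congr hcond rfl rfl

theorem pv_min?_eq_some_of {α κ : Type} [LinearOrder κ] {l : List α} {key : α → κ}
    (hinj : ∀ a b, key a = key b → a = b) {x : α}
    (hx : x ∈ l) (hmin : ∀ y ∈ l, key x ≤ key y) :
    PySem.List.min? l key = some x := by
  cases hm : PySem.List.min? l key with
  | none =>
    rw [PySem.List.min?_eq_none_iff] at hm
    subst hm; cases hx
  | some m =>
    have h1 : key m ≤ key x := PySem.List.min?_isMin hm x hx
    have h2 : key x ≤ key m := hmin m (PySem.List.min?_mem hm)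
    exact congrArg some (hinj m x (le_antisymm h1 h2))

-- the minimum under an injective key only depends on the SET of elements
theorem pv_min?_mem_congr {α κ : Type} [LinearOrder κ] {l l' : List α} (key : α → κ)
    (hinj : ∀ a b, key a = key b → a = b) (h : ∀ x, x ∈ l ↔ x ∈ l') :
    PySem.List.min? l key = PySem.List.min? l' key := by
  cases hm : PySem.List.min? l key with
  | none =>
    rw [PySem.List.min?_eq_none_iff] at hm
    subst hm
    have : l' = [] := by
      apply List.eq_nil_iff_forall_not_mem.mpr
      intro x hx
      exact (List.not_mem_nil).elim ((h x).mpr hx)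
    rw [this]
    exact ((PySem.List.min?_eq_none_iff [] key).mpr rfl).symm
  | some m =>
    exact (pv_min?_eq_some_of hinj ((h m).mp (PySem.List.min?_mem hm))
      (fun y hy => PySem.List.min?_isMin hm y ((h y).mpr hy))).symm

-- the first hit of find? in a ≤-sorted list is ≤ every hit
theorem pv_find?_min {α : Type} [LinearOrder α] {l : List α} {p : α → Bool} {x : α}
    (hs : l.Pairwise (· ≤ ·)) (hf : l.find? p = some x) :
    ∀ y ∈ l, p y = true → x ≤ y := by
  induction l with
  | nil => cases hf
  | cons a l ih =>
    rw [List.pairwise_cons] at hs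
    by_cases ha : p a = true
    · rw [List.find?_cons_of_pos ha] at hf
      injection hf with hf; subst hf
      intro y hy _
      rcases List.mem_cons.mp hy with h | h
      · exact le_of_eq h.symm
      · exact hs.1 y h
    · rw [List.find?_cons_of_neg ha] at hf
      intro y hy hp
      rcases List.mem_cons.mp hy with h | h
      · exact absurd (h ▸ hp) ha
      · exact ih hs.2 hf y h hp

-- A's value, characterised over the deduplicated pool s
theorem pv_a_core (s : List String) :
    (match (PySem.List.sorted s (fun x => x)).find? (fun y => PySem.Str.endswith y "-1") with
     | some x => x
     | none =>
        (PySem.List.sorted2 (PySem.List.sorted s (fun x => x)) pvIsoNumA (fun x => x)).headD "") =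
    (match PySem.List.min? (s.filter (fun y => PySem.Str.endswith y "-1")) (fun x => x) with
     | some r => r
     | none => (PySem.List.min? s pvLexKey).getD "") := by
  have hAB : pvIsoNumA = pvSuffixNum := rfl
  have hperm : (PySem.List.sorted s (fun x => x)).Perm s :=
    PySem.List.sorted_perm s (fun x => x) false
  have hpw : (PySem.List.sorted s (fun x => x)).Pairwise (· ≤ ·) := by
    simpa using PySem.List.sorted_pairwise s (fun x => x)
  have hlexinj : ∀ a b : String, pvLexKey a = pvLexKey b → a = b := by
    intro a b hab
    simpa [pvLexKey] using congrArg (fun t => (ofLex t).2) hab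
  cases hf : (PySem.List.sorted s (fun x => x)).find? (fun y => PySem.Str.endswith y "-1") with
  | some x =>
    have hpx : PySem.Str.endswith x "-1" = true := by
      have h := List.find?_some hf; simpa using h
    have hxs : x ∈ s := hperm.mem_iff.mp (List.mem_of_find?_eq_some hf)
    have hxr : x ∈ s.filter (fun y => PySem.Str.endswith y "-1") := List.mem_filter.mpr ⟨hxs, hpx⟩
    have hmin : PySem.List.min? (s.filter (fun y => PySem.Str.endswith y "-1"))
        (fun x => x) = some x := by
      apply pv_min?_eq_some_of (fun a b h => h) hxr
      intro y hy
      exact pv_find?_min hpw hf y (hperm.mem_iff.mpr (List.mem_filter.mp hy).1)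
        (List.mem_filter.mp hy).2
    rw [hmin]
  | none =>
    have hfe : s.filter (fun y => PySem.Str.endswith y "-1") = [] := by
      rw [List.filter_eq_nil_iff]
      intro y hy
      exact List.find?_eq_none.mp hf y (hperm.mem_iff.mpr hy)
    rw [hfe]
    rw [show (PySem.List.min? ([] : List String) (fun x : String => x)) = none from rfl]
    rw [List.headD_eq_head?, pv_sorted2_head?, hAB, pv_min2?_eq_min?_lex]
    rw [pv_min?_mem_congr pvLexKey hlexinj (fun x => hperm.mem_iff)]

-- the option-accumulator step of PySem.List.min?
def pvMinStep {α κ : Type} [LT κ] [DecidableLT κ] (key : α → κ)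
    (acc : Option α) (x : α) : Option α :=
  match acc with
  | none => some x
  | some m => if key x < key m then some x else some m

theorem pv_min?_eq_foldl {α κ : Type} [LT κ] [DecidableLT κ] (l : List α) (key : α → κ) :
    PySem.List.min? l key = l.foldl (pvMinStep key) none := rfl

-- B state component 2's step, on (num, id) pairs
def pvOtherStep (o : Option (Int × String)) (x : String) : Option (Int × String) :=
  match o with
  | none => some (pvSuffixNum x, x)
  | some b => if pvSuffixNum x < b.1 ∨ (pvSuffixNum x = b.1 ∧ x < b.2)
              then some (pvSuffixNum x, x) else some b

-- B's fold splits into two independent running-minimum folds over the partition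
theorem pv_b_fold_split (l : List String)
    (r0 : Option String) (o0 : Option (Int × String)) :
    l.foldl pvStepB (r0, o0) =
      ((l.filter (fun y => PySem.Str.endswith y "-1")).foldl (pvMinStep (fun x : String => x)) r0,
       (l.filter (fun y => !PySem.Str.endswith y "-1")).foldl pvOtherStep o0) := by
  induction l generalizing r0 o0 with
  | nil => rfl
  | cons x l ih =>
    by_cases hx : PySem.Str.endswith x "-1" = true
    · simp only [List.foldl_cons, List.filter_cons, hx, Bool.not_true, if_true, if_false,
        Bool.false_eq_true, pvStepB]
      rw [ih]
      cases r0 <;> rfl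
    · simp only [List.foldl_cons, List.filter_cons, hx, Bool.not_false, if_true, if_false,
        Bool.false_eq_true, pvStepB]
      rw [ih]
      cases o0 <;> rfl

-- the pair fold is the image under g of the min? fold with the lexicographic key
theorem pv_other_fold_map (l : List String) (o : Option String) :
    l.foldl pvOtherStep (o.map (fun m => (pvSuffixNum m, m))) =
      (l.foldl (pvMinStep pvLexKey) o).map (fun m => (pvSuffixNum m, m)) := by
  induction l generalizing o with
  | nil => rfl
  | cons x l ih =>
    simp only [List.foldl_cons]
    have hstep : pvOtherStep (o.map (fun m => (pvSuffixNum m, m))) x =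
        (pvMinStep pvLexKey o x).map (fun m => (pvSuffixNum m, m)) := by
      cases o with
      | none => rfl
      | some m =>
        simp only [Option.map_some, pvOtherStep, pvMinStep]
        have hiff : (pvSuffixNum x < pvSuffixNum m ∨
            (pvSuffixNum x = pvSuffixNum m ∧ x < m)) ↔ pvLexKey x < pvLexKey m := by
          simp only [pvLexKey]
          rw [Prod.Lex.lt_iff]
          exact Iff.rfl
        rw [if_congr hiff rfl rfl]
        by_cases h : pvLexKey x < pvLexKey m
        · simp [h]
        · simp [h]
    rw [hstep, ih]

-- B's value, characterised the same way as A's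
theorem pv_b_core (l : List String) :
    choose_reference_isoform_alt l =
    (match PySem.List.min? (l.filter (fun y => PySem.Str.endswith y "-1")) (fun x : String => x) with
     | some r => r
     | none => (PySem.List.min? (l.filter (fun y => !PySem.Str.endswith y "-1")) pvLexKey).getD "") := by
  unfold choose_reference_isoform_alt
  rw [pv_b_fold_split]
  have h2 : (l.filter (fun y => !PySem.Str.endswith y "-1")).foldl pvOtherStep none =
      ((l.filter (fun y => !PySem.Str.endswith y "-1")).foldl (pvMinStep pvLexKey) none).map
        (fun m => (pvSuffixNum m, m)) :=
    pv_other_fold_map _ none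
  rw [pv_min?_eq_foldl, pv_min?_eq_foldl, h2]
  cases (l.filter (fun y => PySem.Str.endswith y "-1")).foldl (pvMinStep (fun x : String => x)) none with
  | some r => rfl
  | none =>
    cases (l.filter (fun y => !PySem.Str.endswith y "-1")).foldl (pvMinStep pvLexKey) none with
    | some m => rfl
    | none => rfl

-- ===== VERDICT (by name: the statement is the Claim_ definition above) =====
theorem choose_reference_isoform_spec : Claim_equal_choose_reference_isoform := by
  intro iso_ids _ _
  unfold Spec_choose_reference_isoform
  rw [pv_b_core]
  unfold choose_reference_isoform
  rw [pv_a_core (PySem.Set.ofList iso_ids)]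
  have hlexinj : ∀ a b : String, pvLexKey a = pvLexKey b → a = b := by
    intro a b hab
    simpa [pvLexKey] using congrArg (fun t => (ofLex t).2) hab
  have hmemS : ∀ x, x ∈ PySem.Set.ofList iso_ids ↔ x ∈ iso_ids := by
    intro x; simp [PySem.Set.mem_ofList]
  have hreffilter : ∀ x, x ∈ (PySem.Set.ofList iso_ids).filter (fun y => PySem.Str.endswith y "-1") ↔
      x ∈ iso_ids.filter (fun y => PySem.Str.endswith y "-1") := by
    intro x
    simp only [List.mem_filter, hmemS]
  rw [pv_min?_mem_congr (fun x : String => x) (fun a b h => h) hreffilter]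
  cases hm : PySem.List.min? (iso_ids.filter (fun y => PySem.Str.endswith y "-1")) (fun x : String => x) with
  | some r => rfl
  | none =>
    -- no '-1' id anywhere: the other-filter keeps everything
    have hnone : ∀ y ∈ iso_ids, PySem.Str.endswith y "-1" = false := by
      rw [PySem.List.min?_eq_none_iff] at hm
      intro y hy
      by_contra h
      have : y ∈ iso_ids.filter (fun y => PySem.Str.endswith y "-1") :=
        List.mem_filter.mpr ⟨hy, Bool.not_eq_false _ |>.mp h⟩
      rw [hm] at this; cases this
    have hself : iso_ids.filter (fun y => !PySem.Str.endswith y "-1") = iso_ids := by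
      apply List.filter_eq_self.mpr
      intro y hy
      simp only [hnone y hy, Bool.not_false]
    rw [hself, pv_min?_mem_congr pvLexKey hlexinj hmemS]
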